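-- pv_equiv track=rewrite | github.com/pr3d4t0r/aoc2020 | aoc/day_14_bitmask.py | _generateAllFloatingBitValues
-- ===== SOURCE A (Python) =====
-- def _generateAllFloatingBitValues(rawMask):
--     masks = [rawMask]
--     for pos, bit in enumerate(rawMask):
--         if bit != 'X':
--             for mask in masks:
--                 mask[pos] = bit
--             continue
--
--         newMasks = list()
--         for mask in masks:
--             for bitValue in ('0', '1'):
--                 mask[pos] = bitValue
--                 newMasks.append(mask[:])
--         masks = newMasks
--
--     return [''.join(mask) for mask in masks]
-- ===== SOURCE B (Python) =====
-- def _generateAllFloatingBitValues(rawMask):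
--     # Return-value equivalent to A; unlike A, does not mutate rawMask.
--     xIndices = [i for i, bit in enumerate(rawMask) if bit == 'X']
--     combos = [[]]
--     for _ in xIndices:
--         combos = [c + [b] for c in combos for b in '01']
--     result = []
--     for combo in combos:
--         base = list(rawMask)
--         for i, b in zip(xIndices, combo):
--             base[i] = b
--         result.append(''.join(base))
--     return result
-- ===== Notes on version B (the rewrite author's own statement) =====
-- stated objective: idiomatic
-- what changed: A grows a list of full masks and rewrites every mask at every position (including non-X ones); B collects the X positions in one pass, enumerates the bit combinations on their own, and fills each combination into a fresh copy of the mask; B also does not mutate its argument (A does; equivalence is about the return value only).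
import Mathlib
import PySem

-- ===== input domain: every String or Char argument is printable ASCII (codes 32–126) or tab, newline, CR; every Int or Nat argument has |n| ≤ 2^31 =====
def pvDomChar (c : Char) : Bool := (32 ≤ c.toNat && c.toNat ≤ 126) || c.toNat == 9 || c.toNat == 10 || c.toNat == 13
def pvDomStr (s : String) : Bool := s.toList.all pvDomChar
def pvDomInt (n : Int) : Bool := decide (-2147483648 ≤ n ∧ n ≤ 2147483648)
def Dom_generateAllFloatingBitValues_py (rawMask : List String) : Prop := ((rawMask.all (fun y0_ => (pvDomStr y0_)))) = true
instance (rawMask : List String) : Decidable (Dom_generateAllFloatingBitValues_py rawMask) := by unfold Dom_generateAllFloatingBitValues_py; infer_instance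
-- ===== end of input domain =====

-- B collects the 'X' positions once and fills each bit combination into a copy of the
-- mask, instead of A's rewrite-every-mask-at-every-position doubling; objective:
-- alternative/idiomatic. Equivalence is about the RETURN value only: Python A mutates
-- its list argument in place, B does not.

-- ===== PORT A =====
-- one step of A's outer loop: pb = (pos, bit); non-'X' writes bit into every mask,
-- 'X' doubles the mask list with '0' then '1' at pos (Python's append order)
def pvStepA (masks : List (List String)) (pb : Int × String) : List (List String) :=
  if pb.2 ≠ "X" then masks.map (fun m => m.set pb.1.toNat pb.2)
  else masks.flatMap (fun m => [m.set pb.1.toNat "0", m.set pb.1.toNat "1"])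

def generateAllFloatingBitValues_py (rawMask : List String) : List String :=
  ((PySem.List.enumerate rawMask).foldl pvStepA [rawMask]).map (fun m => PySem.Str.join "" m)

-- ===== PORT B =====
-- combos after k 'X's: every list of k bits, extended at the tail (Source B's combos loop)
def pvCombos : Nat → List (List String)
  | 0 => [[]]
  | n + 1 => (pvCombos n).flatMap (fun c => ["0", "1"].map (fun b => c ++ [b]))

-- write bits into base at the given indices (Source B's zip/assignment loop)
def pvFill (base : List String) (idxs : List Nat) (bits : List String) : List String :=
  (idxs.zip bits).foldl (fun acc p => acc.set p.1 p.2) base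

def generateAllFloatingBitValues_py_alt (rawMask : List String) : List String :=
  let xIdx := (PySem.List.enumerate rawMask).filterMap
    (fun p => if p.2 = "X" then some p.1.toNat else none)
  (pvCombos xIdx.length).map (fun c => PySem.Str.join "" (pvFill rawMask xIdx c))

def Spec_generateAllFloatingBitValues_py (rawMask : List String) (out : List String) : Prop := out = generateAllFloatingBitValues_py_alt rawMask
instance (rawMask : List String) (out : List String) : Decidable (Spec_generateAllFloatingBitValues_py rawMask out) := by unfold Spec_generateAllFloatingBitValues_py; infer_instance

-- ===== CLAIM (what is proved, stated in full; the proofs are below) =====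
def Claim_equal_generateAllFloatingBitValues_py : Prop := ∀ (rawMask : List String), Dom_generateAllFloatingBitValues_py rawMask → Spec_generateAllFloatingBitValues_py rawMask (generateAllFloatingBitValues_py rawMask)

-- ===== LEMMAS AND PROOFS =====

theorem pvSet_self {m : List String} {k : Nat} {x : String} (h : m[k]? = some x) :
    m.set k x = m := by
  have hk : k < m.length := by
    by_contra hk
    simp [List.getElem?_eq_none (by omega : m.length ≤ k)] at h
  apply List.ext_getElem?
  intro j
  rw [List.getElem?_set]
  split
  · next hj => subst hj; simp [hk, ← h]
  · rfl

theorem pvStepA_append (xs ys : List (List String)) (p : Int × String) :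
    pvStepA (xs ++ ys) p = pvStepA xs p ++ pvStepA ys p := by
  unfold pvStepA; split_ifs <;> simp

theorem pvFoldl_append (l : List (Int × String)) (xs ys : List (List String)) :
    l.foldl pvStepA (xs ++ ys) = l.foldl pvStepA xs ++ l.foldl pvStepA ys := by
  induction l generalizing xs ys with
  | nil => simp
  | cons p l ih => simp [List.foldl_cons, pvStepA_append, ih]

theorem pvCombos_succ_cons (n : Nat) :
    pvCombos (n + 1) = ["0", "1"].flatMap (fun b => (pvCombos n).map (fun c => b :: c)) := by
  induction n with
  | zero => decide
  | succ n ih =>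
    show (pvCombos (n + 1)).flatMap _ = _
    conv_lhs => rw [ih]
    show _ = ["0", "1"].flatMap (fun b =>
      ((pvCombos n).flatMap (fun c => ["0", "1"].map (fun x => c ++ [x]))).map (fun c => b :: c))
    simp only [List.flatMap_assoc, List.flatMap_map, List.map_flatMap,
      List.cons_append, List.map_cons, List.map_nil]

def pvXIdx (xs : List String) (n : Int) : List Nat :=
  (PySem.List.enumerate xs n).filterMap (fun p => if p.2 = "X" then some p.1.toNat else none)

theorem pvKey (xs : List String) (n : Int) (hn : 0 ≤ n) (m : List String)
    (h : ∀ i : Nat, i < xs.length → m[n.toNat + i]? = xs[i]?) :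
    (PySem.List.enumerate xs n).foldl pvStepA [m]
      = (pvCombos (pvXIdx xs n).length).map (fun c => pvFill m (pvXIdx xs n) c) := by
  induction xs generalizing n m with
  | nil => simp [PySem.List.enumerate_nil, pvXIdx, pvCombos, pvFill]
  | cons x xs ih =>
    have hn1 : (0:Int) ≤ n + 1 := by omega
    have htn : (n + 1).toNat = n.toNat + 1 := by omega
    rw [PySem.List.enumerate_cons]
    by_cases hx : x = "X"
    · subst hx
      have hXidx : pvXIdx ("X" :: xs) n = n.toNat :: pvXIdx xs (n + 1) := by
        simp [pvXIdx, PySem.List.enumerate_cons]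
      have hstep : pvStepA [m] (n, "X") = [m.set n.toNat "0"] ++ [m.set n.toNat "1"] := by
        simp [pvStepA]
      have hpres : ∀ b : String, ∀ i : Nat, i < xs.length →
          (m.set n.toNat b)[(n+1).toNat + i]? = xs[i]? := by
        intro b i hi
        rw [htn, List.getElem?_set_ne (by omega)]
        have := h (i + 1) (by simpa using Nat.succ_lt_succ hi)
        simpa [Nat.add_comm, Nat.add_assoc, Nat.add_left_comm] using this
      rw [List.foldl_cons, hstep, pvFoldl_append,
        ih (n + 1) hn1 _ (hpres "0"), ih (n + 1) hn1 _ (hpres "1"),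
        hXidx]
      have hlen : (n.toNat :: pvXIdx xs (n + 1)).length = (pvXIdx xs (n + 1)).length + 1 := rfl
      rw [hlen, pvCombos_succ_cons]
      simp [List.flatMap_cons, List.map_map, Function.comp_def, pvFill,
        List.zip_cons_cons]
    · have hXidx : pvXIdx (x :: xs) n = pvXIdx xs (n + 1) := by
        simp [pvXIdx, PySem.List.enumerate_cons, hx]
      have hm0 : m[n.toNat]? = some x := by simpa using h 0 (by simp)
      have hstep : pvStepA [m] (n, x) = [m] := by
        simp [pvStepA, hx, pvSet_self hm0]
      have hpres : ∀ i : Nat, i < xs.length → m[(n+1).toNat + i]? = xs[i]? := by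
        intro i hi
        rw [htn]
        have := h (i + 1) (by simpa using Nat.succ_lt_succ hi)
        simpa [Nat.add_comm, Nat.add_assoc, Nat.add_left_comm] using this
      rw [List.foldl_cons, hstep, ih (n + 1) hn1 m hpres, hXidx]

-- ===== VERDICT (by name: the statement is the Claim_ definition above) =====
theorem generateAllFloatingBitValues_py_spec : Claim_equal_generateAllFloatingBitValues_py := by
  intro rawMask _
  show _ = _
  unfold generateAllFloatingBitValues_py generateAllFloatingBitValues_py_alt
  rw [pvKey rawMask 0 le_rfl rawMask (by intro i hi; simp)]
  simp [pvXIdx, List.map_map, Function.comp_def]
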